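-- pv_equiv track=rewrite | github.com/AugustBugge/canonicalSystems | script4.py | is_nondecreasing_gaps
-- ===== SOURCE A (Python) =====
-- from typing import List, Tuple, Optional
--
-- def is_nondecreasing_gaps(coins_sorted: List[int]) -> bool:
--     """True if consecutive gaps are nondecreasing; vacuously True for len < 3."""
--     if len(coins_sorted) < 3:
--         return True
--     gaps = [coins_sorted[i+1] - coins_sorted[i] for i in range(len(coins_sorted)-1)]
--     # Check d1 <= d2 <= ...:
--     for i in range(len(gaps) - 1):
--         if gaps[i] > gaps[i+1]:
--             return False
--     return True
-- ===== SOURCE B (Python) =====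
-- def is_nondecreasing_gaps(coins_sorted):
--     """True if consecutive gaps are nondecreasing; vacuously True for len < 3."""
--     if len(coins_sorted) < 3:
--         return True
--     a, b, c = coins_sorted[0], coins_sorted[1], coins_sorted[2]
--     if b - a > c - b:
--         return False
--     return is_nondecreasing_gaps(coins_sorted[1:])
-- ===== Notes on version B (the rewrite author's own statement) =====
-- stated objective: alternative
-- what changed: Replaces the build-a-gaps-list-then-rescan-by-index approach with structural recursion on the list: destructure the first three elements, test the window, and recurse on the tail; no indices and no intermediate list.
import Mathlib
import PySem

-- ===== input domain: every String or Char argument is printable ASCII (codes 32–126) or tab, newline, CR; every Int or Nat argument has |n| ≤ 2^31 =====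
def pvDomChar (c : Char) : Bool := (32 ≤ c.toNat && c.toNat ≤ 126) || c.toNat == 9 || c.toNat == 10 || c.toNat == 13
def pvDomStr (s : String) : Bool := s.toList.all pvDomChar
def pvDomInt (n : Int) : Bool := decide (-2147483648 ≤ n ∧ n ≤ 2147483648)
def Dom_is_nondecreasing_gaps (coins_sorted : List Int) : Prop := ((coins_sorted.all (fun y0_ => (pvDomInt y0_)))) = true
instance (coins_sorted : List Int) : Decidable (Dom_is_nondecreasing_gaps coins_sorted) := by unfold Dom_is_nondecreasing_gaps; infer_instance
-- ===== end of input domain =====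

-- B replaces A's build-a-gaps-list-then-rescan-by-index pass with structural recursion on the
-- list (destructure the first window, recurse on the tail); objective: alternative decomposition.


-- ===== PORT A =====
def is_nondecreasing_gaps (coins_sorted : List Int) : Bool :=
  if coins_sorted.length < 3 then true
  else
    let gaps := (List.range (coins_sorted.length - 1)).map
      (fun i => coins_sorted.getD (i+1) 0 - coins_sorted.getD i 0)
    (List.range (gaps.length - 1)).all
      (fun i => !(gaps.getD i 0 > gaps.getD (i+1) 0))

-- ===== PORT B =====
-- xs[1:] on a list is exactly List.drop 1
def is_nondecreasing_gaps_alt (coins_sorted : List Int) : Bool :=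
  if coins_sorted.length < 3 then true
  else
    let a := coins_sorted.getD 0 0
    let b := coins_sorted.getD 1 0
    let c := coins_sorted.getD 2 0
    if b - a > c - b then false
    else is_nondecreasing_gaps_alt (coins_sorted.drop 1)
termination_by coins_sorted.length
decreasing_by simp; omega

-- ===== PRECONDITION & SPEC =====
def Spec_is_nondecreasing_gaps (coins_sorted : List Int) (out : Bool) : Prop := out = is_nondecreasing_gaps_alt coins_sorted
instance (coins_sorted : List Int) (out : Bool) : Decidable (Spec_is_nondecreasing_gaps coins_sorted out) := by unfold Spec_is_nondecreasing_gaps; infer_instance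

-- ===== CLAIM (what is proved, stated in full; the proofs are below) =====
def Claim_equal_is_nondecreasing_gaps : Prop := ∀ (coins_sorted : List Int), Dom_is_nondecreasing_gaps coins_sorted → Spec_is_nondecreasing_gaps coins_sorted (is_nondecreasing_gaps coins_sorted)

-- ===== LEMMAS AND PROOFS =====

-- Indexing A's gaps list returns the difference of neighbours.
theorem gaps_getD (xs : List Int) (i : Nat) (hi : i < xs.length - 1) :
    ((List.range (xs.length - 1)).map
      (fun j => xs.getD (j+1) 0 - xs.getD j 0)).getD i 0
      = xs.getD (i+1) 0 - xs.getD i 0 := by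
  simp [List.getD_eq_getElem?_getD, hi]

-- The shared characterisation: gaps are nondecreasing at every window.
def GapsChar (xs : List Int) : Prop :=
  ∀ i, i < xs.length - 2 →
    xs.getD (i+1) 0 - xs.getD i 0 ≤ xs.getD (i+2) 0 - xs.getD (i+1) 0

theorem getD_drop_one (xs : List Int) (j : Nat) :
    (xs.drop 1).getD j 0 = xs.getD (j+1) 0 := by
  simp [List.getD_eq_getElem?_getD]

theorem A_iff (xs : List Int) : is_nondecreasing_gaps xs = true ↔ GapsChar xs := by
  unfold is_nondecreasing_gaps GapsChar
  by_cases h : xs.length < 3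
  · simp [h]; intro i hi; omega
  · rw [if_neg h]
    simp only [List.length_map, List.length_range, List.all_eq_true, List.mem_range]
    have heq : xs.length - 1 - 1 = xs.length - 2 := by omega
    rw [heq]
    constructor
    · intro hA i hi
      have := hA i hi
      rw [gaps_getD xs i (by omega), gaps_getD xs (i+1) (by omega)] at this
      simp only [show i+1+1 = i+2 from rfl] at this
      simpa using this
    · intro hB i hi
      have := hB i hi
      rw [gaps_getD xs i (by omega), gaps_getD xs (i+1) (by omega)]
      simp only [show i+1+1 = i+2 from rfl]
      simpa using this

theorem alt_iff (xs : List Int) : is_nondecreasing_gaps_alt xs = true ↔ GapsChar xs := by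
  induction xs using is_nondecreasing_gaps_alt.induct with
  | case1 xs h =>
      rw [is_nondecreasing_gaps_alt, if_pos h]
      simp [GapsChar]; intro i hi; omega
  | case2 xs h a b c hc =>
      rw [is_nondecreasing_gaps_alt, if_neg h, if_pos hc]
      constructor
      · intro hfalse; exact absurd hfalse (by simp)
      · intro hall
        have h0 := hall 0 (by omega)
        simp only [Nat.zero_add] at h0
        exact absurd h0 (by simp only [not_le]; exact hc)
  | case3 xs h a b c hc ih =>
      rw [is_nondecreasing_gaps_alt, if_neg h, if_neg hc, ih]
      have hc' : xs.getD 1 0 - xs.getD 0 0 ≤ xs.getD 2 0 - xs.getD 1 0 := not_lt.mp hc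
      unfold GapsChar
      constructor
      · intro hrec i hi
        cases i with
        | zero => simpa using hc'
        | succ j =>
            have := hrec j (by simp; omega)
            rw [getD_drop_one, getD_drop_one, getD_drop_one] at this
            simpa using this
      · intro hall j hj
        rw [getD_drop_one, getD_drop_one, getD_drop_one]
        have := hall (j+1) (by simp at hj; omega)
        simpa using this

theorem main_eq (xs : List Int) :
    is_nondecreasing_gaps xs = is_nondecreasing_gaps_alt xs := by
  rw [Bool.eq_iff_iff, A_iff, alt_iff]

-- ===== VERDICT (by name: the statement is the Claim_ definition above) =====
theorem is_nondecreasing_gaps_spec : Claim_equal_is_nondecreasing_gaps := by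
  intro xs _
  unfold Spec_is_nondecreasing_gaps
  exact main_eq xs
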